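-- pv_equiv track=rewrite | github.com/Geralt1983/Thanos | Tools/telegram_bot.py | _classify_photo
-- ===== SOURCE A (Python) =====
-- def _classify_photo(caption: str) -> str:
--     """
--     Classify photo type based on caption keywords.
--
--     Returns:
--         Photo type: receipt, document, screenshot, whiteboard, note, reference, personal, unknown
--     """
--     caption_lower = caption.lower() if caption else ""
--
--     # Receipt keywords
--     if any(kw in caption_lower for kw in ['receipt', 'invoice', 'bill', 'purchase', 'expense', 'payment', 'bought', 'paid']):
--         return 'receipt'
--
--     # Document keywords
--     if any(kw in caption_lower for kw in ['document', 'contract', 'form', 'paper', 'letter', 'certificate', 'license', 'id', 'passport']):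
--         return 'document'
--
--     # Screenshot keywords
--     if any(kw in caption_lower for kw in ['screenshot', 'screen', 'app', 'error', 'bug', 'ui', 'interface']):
--         return 'screenshot'
--
--     # Whiteboard keywords
--     if any(kw in caption_lower for kw in ['whiteboard', 'board', 'diagram', 'flowchart', 'meeting', 'brainstorm']):
--         return 'whiteboard'
--
--     # Reference keywords
--     if any(kw in caption_lower for kw in ['reference', 'save', 'remember', 'later', 'bookmark', 'look up', 'calendar', 'schedule']):
--         return 'reference'
--
--     # Note keywords
--     if any(kw in caption_lower for kw in ['note', 'notes', 'handwritten', 'written', 'list', 'todo']):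
--         return 'note'
--
--     # Personal photo keywords
--     if any(kw in caption_lower for kw in ['photo', 'picture', 'selfie', 'family', 'kids', 'fun', 'vacation']):
--         return 'personal'
--
--     # No caption or unknown
--     return 'unknown' if not caption else 'reference'
-- ===== SOURCE B (Python) =====
-- # One flat keyword -> (priority, label) map; a single scan keeps the best (lowest-priority) hit.
-- _KEYWORD_TAG = {}
-- for _prio, (_label, _kws) in enumerate([
--     ('receipt', ['receipt', 'invoice', 'bill', 'purchase', 'expense', 'payment', 'bought', 'paid']),
--     ('document', ['document', 'contract', 'form', 'paper', 'letter', 'certificate', 'license', 'id', 'passport']),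
--     ('screenshot', ['screenshot', 'screen', 'app', 'error', 'bug', 'ui', 'interface']),
--     ('whiteboard', ['whiteboard', 'board', 'diagram', 'flowchart', 'meeting', 'brainstorm']),
--     ('reference', ['reference', 'save', 'remember', 'later', 'bookmark', 'look up', 'calendar', 'schedule']),
--     ('note', ['note', 'notes', 'handwritten', 'written', 'list', 'todo']),
--     ('personal', ['photo', 'picture', 'selfie', 'family', 'kids', 'fun', 'vacation']),
-- ]):
--     for _kw in _kws:
--         _KEYWORD_TAG[_kw] = (_prio, _label)
--
--
-- def _classify_photo(caption: str) -> str: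
--     caption_lower = caption.lower() if caption else ""
--     best = None
--     for kw, tag in _KEYWORD_TAG.items():
--         if kw in caption_lower and (best is None or tag[0] < best[0]):
--             best = tag
--     return best[1] if best is not None else ('unknown' if not caption else 'reference')
-- ===== Notes on version B (the rewrite author's own statement) =====
-- stated objective: alternative
-- what changed: Inverted the iteration: instead of seven ordered short-circuiting if/any keyword-group blocks, B builds one flat keyword->(priority,label) dict and makes a single scan over all keywords keeping the lowest-priority hit (a min-selection), with the same unknown/reference default.
import Mathlib
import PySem

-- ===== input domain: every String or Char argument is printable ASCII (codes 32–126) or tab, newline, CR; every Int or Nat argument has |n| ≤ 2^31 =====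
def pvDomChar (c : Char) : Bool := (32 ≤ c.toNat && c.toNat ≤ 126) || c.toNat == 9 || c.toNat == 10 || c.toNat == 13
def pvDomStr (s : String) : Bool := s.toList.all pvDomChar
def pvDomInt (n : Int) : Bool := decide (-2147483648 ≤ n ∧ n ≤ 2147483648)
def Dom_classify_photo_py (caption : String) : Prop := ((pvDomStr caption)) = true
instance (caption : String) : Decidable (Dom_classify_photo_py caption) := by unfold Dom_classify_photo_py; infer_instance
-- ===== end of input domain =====

-- B flips the iteration: one flat keyword -> (priority, label) map scanned once, keeping the
-- lowest-priority hit, instead of A's seven ordered short-circuiting if/any blocks (simpler data flow).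

-- ===== PORT A =====
def classify_photo_py (caption : String) : String :=
  let caption_lower := if caption ≠ "" then PySem.Str.lower caption else ""
  if ["receipt", "invoice", "bill", "purchase", "expense", "payment", "bought", "paid"].any
      (fun kw => PySem.Str.isIn kw caption_lower) then "receipt"
  else if ["document", "contract", "form", "paper", "letter", "certificate", "license", "id", "passport"].any
      (fun kw => PySem.Str.isIn kw caption_lower) then "document"
  else if ["screenshot", "screen", "app", "error", "bug", "ui", "interface"].any
      (fun kw => PySem.Str.isIn kw caption_lower) then "screenshot"
  else if ["whiteboard", "board", "diagram", "flowchart", "meeting", "brainstorm"].any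
      (fun kw => PySem.Str.isIn kw caption_lower) then "whiteboard"
  else if ["reference", "save", "remember", "later", "bookmark", "look up", "calendar", "schedule"].any
      (fun kw => PySem.Str.isIn kw caption_lower) then "reference"
  else if ["note", "notes", "handwritten", "written", "list", "todo"].any
      (fun kw => PySem.Str.isIn kw caption_lower) then "note"
  else if ["photo", "picture", "selfie", "family", "kids", "fun", "vacation"].any
      (fun kw => PySem.Str.isIn kw caption_lower) then "personal"
  else if caption = "" then "unknown" else "reference"

-- ===== PORT B =====
-- the flat dict _KEYWORD_TAG as an association list (keyword, (priority, label)), insertion order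
def pvG1 : List (String × Nat × String) :=
  [("receipt",(0,"receipt")),("invoice",(0,"receipt")),("bill",(0,"receipt")),("purchase",(0,"receipt")),
   ("expense",(0,"receipt")),("payment",(0,"receipt")),("bought",(0,"receipt")),("paid",(0,"receipt"))]
def pvG2 : List (String × Nat × String) :=
  [("document",(1,"document")),("contract",(1,"document")),("form",(1,"document")),("paper",(1,"document")),
   ("letter",(1,"document")),("certificate",(1,"document")),("license",(1,"document")),("id",(1,"document")),
   ("passport",(1,"document"))]
def pvG3 : List (String × Nat × String) :=
  [("screenshot",(2,"screenshot")),("screen",(2,"screenshot")),("app",(2,"screenshot")),("error",(2,"screenshot")),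
   ("bug",(2,"screenshot")),("ui",(2,"screenshot")),("interface",(2,"screenshot"))]
def pvG4 : List (String × Nat × String) :=
  [("whiteboard",(3,"whiteboard")),("board",(3,"whiteboard")),("diagram",(3,"whiteboard")),
   ("flowchart",(3,"whiteboard")),("meeting",(3,"whiteboard")),("brainstorm",(3,"whiteboard"))]
def pvG5 : List (String × Nat × String) :=
  [("reference",(4,"reference")),("save",(4,"reference")),("remember",(4,"reference")),("later",(4,"reference")),
   ("bookmark",(4,"reference")),("look up",(4,"reference")),("calendar",(4,"reference")),("schedule",(4,"reference"))]
def pvG6 : List (String × Nat × String) :=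
  [("note",(5,"note")),("notes",(5,"note")),("handwritten",(5,"note")),("written",(5,"note")),
   ("list",(5,"note")),("todo",(5,"note"))]
def pvG7 : List (String × Nat × String) :=
  [("photo",(6,"personal")),("picture",(6,"personal")),("selfie",(6,"personal")),("family",(6,"personal")),
   ("kids",(6,"personal")),("fun",(6,"personal")),("vacation",(6,"personal"))]
def pvKeywordTag : List (String × Nat × String) := pvG1 ++ pvG2 ++ pvG3 ++ pvG4 ++ pvG5 ++ pvG6 ++ pvG7

-- one step of B's scan: keep the lowest-priority matching tag
def pvStep (cl : String) (acc : Option (Nat × String)) (e : String × Nat × String) : Option (Nat × String) :=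
  if PySem.Str.isIn e.1 cl then
    match acc with
    | none => some e.2
    | some b => if e.2.1 < b.1 then some e.2 else acc
  else acc

def classify_photo_py_alt (caption : String) : String :=
  let caption_lower := if caption ≠ "" then PySem.Str.lower caption else ""
  match pvKeywordTag.foldl (pvStep caption_lower) none with
  | some b => b.2
  | none => if caption = "" then "unknown" else "reference"

-- ===== PRECONDITION & SPEC =====
def Spec_classify_photo_py (caption : String) (out : String) : Prop := out = classify_photo_py_alt caption
instance (caption : String) (out : String) : Decidable (Spec_classify_photo_py caption out) := by unfold Spec_classify_photo_py; infer_instance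

-- ===== CLAIM =====
def Claim_equal_classify_photo_py : Prop := ∀ (caption : String), Dom_classify_photo_py caption → Spec_classify_photo_py caption (classify_photo_py caption)

-- ===== LEMMAS AND PROOFS =====

-- once a tag with minimal priority is held, the scan never replaces it
lemma pv_foldl_frozen (cl : String) (b : Nat × String) (l : List (String × Nat × String))
    (h : ∀ e ∈ l, b.1 ≤ e.2.1) : l.foldl (pvStep cl) (some b) = some b := by
  induction l with
  | nil => rfl
  | cons e l ih =>
      have hb : ¬ e.2.1 < b.1 := not_lt.mpr (h e (by simp))
      have hs : pvStep cl (some b) e = some b := by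
        simp [pvStep, hb]
      rw [List.foldl_cons, hs]
      exact ih (fun x hx => h x (by simp [hx]))

-- on a priority-sorted list, B's min-scan returns the tag of the FIRST matching keyword
lemma pv_foldl_none (cl : String) (l : List (String × Nat × String))
    (hl : l.Pairwise (fun a b => a.2.1 ≤ b.2.1)) :
    l.foldl (pvStep cl) none = (l.find? (fun e => PySem.Str.isIn e.1 cl)).map (·.2) := by
  induction l with
  | nil => rfl
  | cons e l ih =>
      by_cases h : PySem.Str.isIn e.1 cl = true
      · have hs : pvStep cl none e = some e.2 := by unfold pvStep; rw [if_pos h]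
        rw [List.foldl_cons, hs, pv_foldl_frozen cl e.2 l (List.pairwise_cons.mp hl).1]
        simp only [List.find?_cons, h, Option.map_some]
      · have hs : pvStep cl none e = none := by unfold pvStep; rw [if_neg h]
        rw [List.foldl_cons, hs, ih (List.pairwise_cons.mp hl).2]
        simp only [List.find?_cons, Bool.not_eq_true] at *
        simp only [h]

-- first-match tag on a constant-tag group: some tag iff any keyword matches
lemma pv_find_const (p : String × Nat × String → Bool) (l : List (String × Nat × String))
    (t : Nat × String) (h : ∀ e ∈ l, e.2 = t) :
    (l.find? p).map (·.2) = if l.any p then some t else none := by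
  induction l with
  | nil => rfl
  | cons e l ih =>
      by_cases hp : p e = true
      · simp [List.any_cons, hp, h e (by simp)]
      · simp only [List.find?_cons, List.any_cons, Bool.not_eq_true] at *
        simp only [hp, Bool.false_or]
        exact ih (fun x hx => h x (by simp [hx]))

-- Option.map distributes over Option.or
lemma pv_map_or {α β : Type} (f : α → β) (a b : Option α) :
    (a.or b).map f = (a.map f).or (b.map f) := by cases a <;> rfl

-- each group's first-match tag, as rewrite rules
lemma pv_g1 (cl : String) : (pvG1.find? (fun e => PySem.Str.isIn e.1 cl)).map (·.2)
    = if pvG1.any (fun e => PySem.Str.isIn e.1 cl) then some ((0:Nat),"receipt") else none :=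
  pv_find_const _ _ _ (by decide)
lemma pv_g2 (cl : String) : (pvG2.find? (fun e => PySem.Str.isIn e.1 cl)).map (·.2)
    = if pvG2.any (fun e => PySem.Str.isIn e.1 cl) then some ((1:Nat),"document") else none :=
  pv_find_const _ _ _ (by decide)
lemma pv_g3 (cl : String) : (pvG3.find? (fun e => PySem.Str.isIn e.1 cl)).map (·.2)
    = if pvG3.any (fun e => PySem.Str.isIn e.1 cl) then some ((2:Nat),"screenshot") else none :=
  pv_find_const _ _ _ (by decide)
lemma pv_g4 (cl : String) : (pvG4.find? (fun e => PySem.Str.isIn e.1 cl)).map (·.2)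
    = if pvG4.any (fun e => PySem.Str.isIn e.1 cl) then some ((3:Nat),"whiteboard") else none :=
  pv_find_const _ _ _ (by decide)
lemma pv_g5 (cl : String) : (pvG5.find? (fun e => PySem.Str.isIn e.1 cl)).map (·.2)
    = if pvG5.any (fun e => PySem.Str.isIn e.1 cl) then some ((4:Nat),"reference") else none :=
  pv_find_const _ _ _ (by decide)
lemma pv_g6 (cl : String) : (pvG6.find? (fun e => PySem.Str.isIn e.1 cl)).map (·.2)
    = if pvG6.any (fun e => PySem.Str.isIn e.1 cl) then some ((5:Nat),"note") else none :=
  pv_find_const _ _ _ (by decide)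
lemma pv_g7 (cl : String) : (pvG7.find? (fun e => PySem.Str.isIn e.1 cl)).map (·.2)
    = if pvG7.any (fun e => PySem.Str.isIn e.1 cl) then some ((6:Nat),"personal") else none :=
  pv_find_const _ _ _ (by decide)

-- B's whole scan, specialised to the literal table
lemma pv_table (cl : String) :
    pvKeywordTag.foldl (pvStep cl) none = (pvKeywordTag.find? (fun e => PySem.Str.isIn e.1 cl)).map (·.2) :=
  pv_foldl_none cl pvKeywordTag (by decide)

-- ===== VERDICT =====
set_option maxHeartbeats 2000000 in
theorem classify_photo_py_spec : Claim_equal_classify_photo_py := by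
  intro caption _
  unfold Spec_classify_photo_py classify_photo_py classify_photo_py_alt
  simp only [pv_table]
  simp only [pvKeywordTag, List.find?_append, pv_map_or,
    pv_g1, pv_g2, pv_g3, pv_g4, pv_g5, pv_g6, pv_g7]
  simp only [pvG1, pvG2, pvG3, pvG4, pvG5, pvG6, pvG7, List.any_cons, List.any_nil]
  split_ifs <;> simp_all
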